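-- pv_equiv track=rewrite | github.com/TeeKay-FourTwentyOne/math | ramsey-book-graphs/c0_estimation.py | compute_thresholds
-- ===== SOURCE A (Python) =====
-- def compute_thresholds(D11_set, A_values, p):
--     """
--     Compute threshold T(d) for each nonzero position d.
--
--     For d ∈ D11: A(d) + B(d) ≤ thresh_binding  → T(d) = thresh_binding - A(d)
--     For d ∈ D22: A(d) + B(d) ≤ thresh_loose    → T(d) = thresh_loose - A(d)
--
--     thresh_binding = (p-3)/2
--     thresh_loose = (p+3)/2
--     """
--     thresh_binding = (p - 3) // 2
--     thresh_loose = (p + 3) // 2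
--
--     thresholds = {}
--     for d in range(1, p):
--         A_d = int(A_values[d])
--         if d in D11_set:
--             thresholds[d] = thresh_binding - A_d
--         else:
--             thresholds[d] = thresh_loose - A_d
--
--     return thresholds
-- ===== SOURCE B (Python) =====
-- def compute_thresholds(D11_set, A_values, p):
--     # sort the in-range binding positions once, then merge-walk range(1,p)
--     # against that sorted list with a moving front pointer (no per-element
--     # membership test).
--     binding = (p - 3) // 2
--     loose = (p + 3) // 2
--     ms = sorted({x for x in D11_set if 1 <= x < p})
--     thresholds = {}
--     for d in range(1, p):
--         if ms and ms[0] == d: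
--             thresholds[d] = binding - int(A_values[d])
--             ms = ms[1:]
--         else:
--             thresholds[d] = loose - int(A_values[d])
--     return thresholds
-- ===== Notes on version B (the rewrite author's own statement) =====
-- stated objective: alternative
-- what changed: Replaces A's per-element membership branch by sorting the in-range D11 positions once and doing a two-pointer merge walk over range(1,p), taking the binding branch exactly when the head of the sorted member list equals the current position.
import Mathlib
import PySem

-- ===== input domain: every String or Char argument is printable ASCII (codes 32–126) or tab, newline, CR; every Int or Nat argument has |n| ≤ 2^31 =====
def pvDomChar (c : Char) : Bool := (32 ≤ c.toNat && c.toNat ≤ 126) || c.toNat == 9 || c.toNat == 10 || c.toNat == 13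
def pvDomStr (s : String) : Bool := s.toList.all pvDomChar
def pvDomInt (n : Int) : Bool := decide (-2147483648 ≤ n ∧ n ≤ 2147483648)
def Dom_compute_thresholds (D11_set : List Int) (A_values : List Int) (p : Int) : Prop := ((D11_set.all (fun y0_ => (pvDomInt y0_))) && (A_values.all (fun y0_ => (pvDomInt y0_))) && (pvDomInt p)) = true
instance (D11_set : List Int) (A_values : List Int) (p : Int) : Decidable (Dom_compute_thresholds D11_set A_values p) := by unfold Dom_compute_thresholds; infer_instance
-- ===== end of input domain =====

-- B sorts the in-range D11 positions once and merge-walks range(1,p) against that sorted list (alternative algorithm, same result).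

-- ===== PORT A =====
def compute_thresholds (D11_set : List Int) (A_values : List Int) (p : Int) : List (Int × Int) :=
  let thresh_binding := PySem.Int.floordiv (p - 3) 2
  let thresh_loose := PySem.Int.floordiv (p + 3) 2
  let thresholds := (PySem.List.pyRange 1 p 1).foldl
    (fun th d =>
      let A_d := PySem.List.pyGetD A_values d 0
      if d ∈ D11_set then th.insert d (thresh_binding - A_d)
      else th.insert d (thresh_loose - A_d))
    PySem.Dict.empty
  thresholds.items

-- ===== PORT B =====
-- the loop body of Source B: branch on whether the sorted member list's head is the current d
def pvMergeStep (A_values : List Int) (binding loose : Int)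
    (st : PySem.Dict Int Int × List Int) (d : Int) : PySem.Dict Int Int × List Int :=
  match st with
  | (th, m :: rest) =>
      if m = d then (th.insert d (binding - PySem.List.pyGetD A_values d 0), rest)
      else (th.insert d (loose - PySem.List.pyGetD A_values d 0), m :: rest)
  | (th, []) => (th.insert d (loose - PySem.List.pyGetD A_values d 0), [])

def compute_thresholds_alt (D11_set : List Int) (A_values : List Int) (p : Int) : List (Int × Int) :=
  let binding := PySem.Int.floordiv (p - 3) 2
  let loose := PySem.Int.floordiv (p + 3) 2
  let ms := PySem.List.sorted (PySem.Set.ofList (D11_set.filter (fun x => 1 ≤ x && x < p))) (fun x => x) false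
  let final := (PySem.List.pyRange 1 p 1).foldl (pvMergeStep A_values binding loose)
    (PySem.Dict.empty, ms)
  final.1.items

-- ===== PRECONDITION & SPEC =====
-- Pre_ excludes exactly the inputs where Python A raises IndexError: p ≥ 2 with A_values shorter than p.
def Pre_compute_thresholds (D11_set : List Int) (A_values : List Int) (p : Int) : Prop :=
  p ≤ 1 ∨ p ≤ (A_values.length : Int)
instance (D11_set : List Int) (A_values : List Int) (p : Int) : Decidable (Pre_compute_thresholds D11_set A_values p) := by unfold Pre_compute_thresholds; infer_instance
def pvWitness_compute_thresholds : List Int × List Int × Int := ([2], [0, 5, 7, 9], 4)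

def Spec_compute_thresholds (D11_set : List Int) (A_values : List Int) (p : Int) (out : List (Int × Int)) : Prop := out = compute_thresholds_alt D11_set A_values p
instance (D11_set : List Int) (A_values : List Int) (p : Int) (out : List (Int × Int)) : Decidable (Spec_compute_thresholds D11_set A_values p out) := by unfold Spec_compute_thresholds; infer_instance

-- ===== CLAIM (what is proved, stated in full; the proofs are below) =====
def Claim_equal_compute_thresholds : Prop := ∀ (D11_set : List Int) (A_values : List Int) (p : Int), Dom_compute_thresholds D11_set A_values p → Pre_compute_thresholds D11_set A_values p → Spec_compute_thresholds D11_set A_values p (compute_thresholds D11_set A_values p)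

-- ===== LEMMAS AND PROOFS =====

-- A's branch-per-element step is a single insert of a branched value
theorem stepA_eq (D11_set : List Int) (A_values : List Int) (tb tl : Int) :
    (fun (th : PySem.Dict Int Int) (d : Int) =>
        let A_d := PySem.List.pyGetD A_values d 0
        if d ∈ D11_set then th.insert d (tb - A_d) else th.insert d (tl - A_d))
      = (fun th d => th.insert d ((if d ∈ D11_set then tb else tl) - PySem.List.pyGetD A_values d 0)) := by
  funext th d
  by_cases h : d ∈ D11_set <;> simp [h]

-- the merge walk over range(a,p) with a strictly increasing member list ms whose
-- elements lie in [a,p) produces the same dict as branching on membership in ms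
theorem merge_fold (A_values : List Int) (binding loose p : Int) :
    ∀ (n : Nat) (a : Int) (ms : List Int) (th : PySem.Dict Int Int),
      (p - a).toNat = n →
      ms.Pairwise (· < ·) → (∀ m ∈ ms, a ≤ m ∧ m < p) →
      ((PySem.List.pyRange a p 1).foldl (pvMergeStep A_values binding loose) (th, ms)).1
        = (PySem.List.pyRange a p 1).foldl
            (fun th d => th.insert d ((if d ∈ ms then binding else loose) - PySem.List.pyGetD A_values d 0)) th := by
  intro n
  induction n with
  | zero =>
      intro a ms th hn _ _
      rw [PySem.List.pyRange_one_eq_nil (by omega)]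
      simp
  | succ k ih =>
      intro a ms th hn hpw hbnd
      have hap : a < p := by omega
      rw [PySem.List.pyRange_one_cons hap]
      simp only [List.foldl_cons]
      cases ms with
      | nil =>
          simp only [pvMergeStep]
          rw [ih (a + 1) [] _ (by omega) (by simp) (by simp)]
          simp
      | cons m rest =>
          rcases hpw with _ | ⟨hm, hpw'⟩
          by_cases hma : m = a
          · subst hma
            simp only [pvMergeStep, if_true]
            have hmem : (m ∈ m :: rest) := List.mem_cons_self
            rw [if_pos hmem,
              ih (m + 1) rest _ (by omega) hpw'
                (by intro x hx; exact ⟨by have := hm x hx; omega, (hbnd x (List.mem_cons_of_mem _ hx)).2⟩)]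
            apply PySem.List.foldl_congr_mem
            intro acc x hx
            have hxr : m + 1 ≤ x ∧ x < p := (PySem.List.mem_pyRange_one).1 hx
            have : (x ∈ m :: rest) ↔ (x ∈ rest) := by
              constructor
              · intro h; rcases List.mem_cons.1 h with h | h
                · omega
                · exact h
              · exact List.mem_cons_of_mem _
            simp only [this]
          · have ham : a < m := by
              have := (hbnd m List.mem_cons_self).1; omega
            have hanotin : a ∉ m :: rest := by
              intro h; rcases List.mem_cons.1 h with h | h
              · omega
              · have := hm a h; omega
            simp only [pvMergeStep, if_neg hma]
            rw [if_neg hanotin,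
              ih (a + 1) (m :: rest) _ (by omega) (List.Pairwise.cons hm hpw')
                (by intro x hx
                    rcases List.mem_cons.1 hx with rfl | hx'
                    · exact ⟨by omega, (hbnd x List.mem_cons_self).2⟩
                    · have := hm x hx'
                      exact ⟨by omega, (hbnd x (List.mem_cons_of_mem _ hx')).2⟩)]

-- ===== VERDICT (by name: the statement is the Claim_ definition above) =====
theorem compute_thresholds_spec : Claim_equal_compute_thresholds := by
  intro D11_set A_values p _ _
  unfold Spec_compute_thresholds compute_thresholds compute_thresholds_alt
  simp only []
  rw [stepA_eq]
  set ms := PySem.List.sorted (PySem.Set.ofList (D11_set.filter (fun x => 1 ≤ x && x < p))) (fun x => x) false with hms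
  have hpw : ms.Pairwise (· < ·) := PySem.List.sorted_ofList_pairwise_lt _
  have hmemms : ∀ x, x ∈ ms ↔ (x ∈ D11_set ∧ 1 ≤ x ∧ x < p) := by
    intro x
    rw [hms, PySem.List.mem_sorted, PySem.Set.mem_ofList, List.mem_filter]
    simp
  rw [merge_fold A_values _ _ p (p - 1).toNat 1 ms _ rfl hpw
      (by intro m hm; exact ((hmemms m).1 hm).2)]
  congr 1
  apply PySem.List.foldl_congr_mem
  intro acc x hx
  have hxr := (PySem.List.mem_pyRange_one).1 hx
  have : (x ∈ D11_set) ↔ (x ∈ ms) := by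
    rw [hmemms x]; exact ⟨fun h => ⟨h, hxr.1, hxr.2⟩, fun h => h.1⟩
  simp only [this]
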